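-- pv_equiv track=rewrite | github.com/k30035600/lotto023 | utils/calculate_correlation.py | calculate_consecutive_stats
-- ===== SOURCE A (Python) =====
-- from collections import defaultdict
--
-- def calculate_consecutive_stats(rounds):
--     """연속 출현 통계 계산"""
--     seq_map = defaultdict(int)
--     for r in rounds:
--         if not r.get('numbers') or len(r.get('numbers', [])) < 6:
--             continue
--         nums = sorted([int(n) for n in r['numbers'][:6] if 1 <= int(n) <= 45])
--         if len(nums) != 6:
--             continue
--         for i in range(len(nums) - 1):
--             if nums[i+1] - nums[i] == 1:
--                 seq_map[nums[i]] += 1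
--                 seq_map[nums[i+1]] += 1
--     return seq_map
-- ===== SOURCE B (Python) =====
-- from collections import defaultdict
--
-- def calculate_consecutive_stats(rounds):
--     """연속 출현 통계 계산 (set-membership formulation instead of adjacent-pair scan)"""
--     seq_map = defaultdict(int)
--     for r in rounds:
--         numbers = r.get('numbers')
--         if not numbers or len(numbers) < 6:
--             continue
--         nums = sorted(int(n) for n in numbers[:6] if 1 <= int(n) <= 45)
--         if len(nums) != 6:
--             continue
--         s = set(nums)
--         for v in sorted(s):
--             c = (v - 1 in s) + (v + 1 in s)
--             if c:
--                 seq_map[v] += c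
--     return seq_map
-- ===== Notes on version B (the rewrite author's own statement) =====
-- stated objective: alternative
-- what changed: A scans adjacent pairs of the sorted six numbers by index and bumps both endpoints of every diff-1 pair; B instead builds the set of the six numbers and, for each distinct value in increasing order, adds the count of its present neighbours (v-1, v+1) in one write, which yields the same counts and the same key insertion order.
import Mathlib
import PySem

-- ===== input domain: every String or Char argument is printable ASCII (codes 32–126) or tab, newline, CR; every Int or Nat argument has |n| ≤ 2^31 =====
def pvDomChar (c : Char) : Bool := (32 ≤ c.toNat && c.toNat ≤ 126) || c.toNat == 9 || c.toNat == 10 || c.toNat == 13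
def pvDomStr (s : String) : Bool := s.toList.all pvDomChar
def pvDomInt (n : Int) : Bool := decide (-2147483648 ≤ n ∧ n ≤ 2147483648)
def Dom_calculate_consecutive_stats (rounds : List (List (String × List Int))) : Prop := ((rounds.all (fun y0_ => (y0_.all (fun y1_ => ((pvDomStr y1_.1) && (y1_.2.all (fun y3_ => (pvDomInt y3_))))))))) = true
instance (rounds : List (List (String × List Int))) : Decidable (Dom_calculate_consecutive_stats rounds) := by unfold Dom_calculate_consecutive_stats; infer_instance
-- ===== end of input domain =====

-- B replaces A's adjacent-pair scan over the sorted (possibly duplicated) six numbers by a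
-- per-distinct-value set-membership count; objective: alternative (same cost, different algorithm).

-- ===== PORT A =====
-- one round of A's outer loop: guard, filter+sort, then the indexed adjacent-pair scan
def pvRoundA (d : PySem.Dict Int Int) (r : List (String × List Int)) : PySem.Dict Int Int :=
  let rd : PySem.Dict String (List Int) := PySem.Dict.ofList r
  -- `if not r.get('numbers') or len(r.get('numbers', [])) < 6: continue` (None and [] are falsy)
  if rd.get? "numbers" = none ∨ rd.get? "numbers" = some [] ∨ (rd.getD "numbers" []).length < 6 then d
  else
    let numbers := rd.getD "numbers" []          -- r['numbers'] (the key is present after the guard)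
    let nums := PySem.List.sorted ((PySem.List.slice numbers none (some 6)).filter
                  (fun n => decide (1 ≤ n) && decide (n ≤ 45))) (fun n => n)
    if nums.length ≠ 6 then d
    else
      (PySem.List.pyRange 0 ((nums.length : Int) - 1) 1).foldl (fun d i =>
        if PySem.List.pyGetD nums (i + 1) 0 - PySem.List.pyGetD nums i 0 = 1 then
          (d.modify (PySem.List.pyGetD nums i 0) 0 (· + 1)).modify (PySem.List.pyGetD nums (i + 1) 0) 0 (· + 1)
        else d) d

def calculate_consecutive_stats (rounds : List (List (String × List Int))) : List (Int × Int) :=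
  (rounds.foldl pvRoundA PySem.Dict.empty).items

-- ===== PORT B =====
-- one round of B's outer loop: same guard and filtered sort, then a set-membership count per distinct value
def pvRoundB (d : PySem.Dict Int Int) (r : List (String × List Int)) : PySem.Dict Int Int :=
  let rd : PySem.Dict String (List Int) := PySem.Dict.ofList r
  match rd.get? "numbers" with                   -- numbers = r.get('numbers')
  | none => d
  | some numbers =>
    if numbers = [] ∨ numbers.length < 6 then d  -- `if not numbers or len(numbers) < 6`
    else
      let nums := PySem.List.sorted ((PySem.List.slice numbers none (some 6)).filter
                    (fun n => decide (1 ≤ n) && decide (n ≤ 45))) (fun n => n)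
      if nums.length ≠ 6 then d
      else
        let s : PySem.Set Int := PySem.Set.ofList nums
        (PySem.List.sorted s (fun v => v)).foldl (fun d v =>
          let c : Int := (if v - 1 ∈ s then 1 else 0) + (if v + 1 ∈ s then 1 else 0)
          if c ≠ 0 then d.modify v 0 (· + c) else d) d

def calculate_consecutive_stats_alt (rounds : List (List (String × List Int))) : List (Int × Int) :=
  (rounds.foldl pvRoundB PySem.Dict.empty).items

-- ===== PRECONDITION & SPEC =====
def Spec_calculate_consecutive_stats (rounds : List (List (String × List Int))) (out : List (Int × Int)) : Prop := out = calculate_consecutive_stats_alt rounds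
instance (rounds : List (List (String × List Int))) (out : List (Int × Int)) : Decidable (Spec_calculate_consecutive_stats rounds out) := by unfold Spec_calculate_consecutive_stats; infer_instance

-- ===== CLAIM (what is proved, stated in full; the proofs are below) =====
def Claim_equal_calculate_consecutive_stats : Prop := ∀ (rounds : List (List (String × List Int))), Dom_calculate_consecutive_stats rounds → Spec_calculate_consecutive_stats rounds (calculate_consecutive_stats rounds)

-- ===== LEMMAS AND PROOFS =====

-- A's adjacent-pair scan, written structurally (proof-side reformulation of A's inner loop)
def pvPairFold : PySem.Dict Int Int → List Int → PySem.Dict Int Int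
  | d, x :: y :: t =>
      pvPairFold (if y - x = 1 then (d.modify x 0 (· + 1)).modify y 0 (· + 1) else d) (y :: t)
  | d, _ => d

-- B's inner-loop body over the set s of a round's numbers (the lambda in pvRoundB, named)
def pvBBody (s : PySem.Set Int) : PySem.Dict Int Int → Int → PySem.Dict Int Int := fun d v =>
  let c : Int := (if v - 1 ∈ s then 1 else 0) + (if v + 1 ∈ s then 1 else 0)
  if c ≠ 0 then d.modify v 0 (· + c) else d

-- two consecutive `+=` on the same key collapse into one
lemma pv_modify_modify_same (d : PySem.Dict Int Int) (k a b : Int) :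
    (d.modify k 0 (· + a)).modify k 0 (· + b) = d.modify k 0 (· + (a + b)) := by
  simp [PySem.Dict.modify, PySem.Dict.insert_insert_self, PySem.Dict.getD_insert_self, add_assoc]

-- an indexed fold over range(len(zs)) reading ys[k] and zs[k] is the fold over the zip
lemma pv_foldl_range_getD_zip {δ : Type} (g : δ → Int → Int → δ) :
    ∀ (zs ys : List Int) (d : δ), zs.length ≤ ys.length →
      (List.range zs.length).foldl (fun d k => g d (ys.getD k 0) (zs.getD k 0)) d
        = (ys.zip zs).foldl (fun d p => g d p.1 p.2) d := by
  intro zs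
  induction zs with
  | nil => intro ys d _; simp
  | cons z zt ih =>
    intro ys d hle
    match ys with
    | [] => simp at hle
    | y :: yt =>
      rw [List.length_cons, List.range_succ_eq_map]
      simp only [List.foldl_cons, List.foldl_map, List.getD_cons_zero, List.getD_cons_succ,
        List.zip_cons_cons]
      exact ih yt (g d y z) (by simpa using hle)

-- the fold over adjacent zipped pairs is pvPairFold
lemma pv_zip_pairFold :
    ∀ (xs : List Int) (x : Int) (d : PySem.Dict Int Int),
      ((x :: xs).zip xs).foldl (fun d p =>
          if p.2 - p.1 = 1 then (d.modify p.1 0 (· + 1)).modify p.2 0 (· + 1) else d) d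
        = pvPairFold d (x :: xs) := by
  intro xs
  induction xs with
  | nil => intro x d; simp [pvPairFold]
  | cons y t ih =>
    intro x d
    rw [List.zip_cons_cons, List.foldl_cons, pvPairFold]
    exact ih y _

-- A's indexed inner loop is pvPairFold
lemma pv_innerA_eq_pairFold (nums : List Int) (d : PySem.Dict Int Int) :
    (PySem.List.pyRange 0 ((nums.length : Int) - 1) 1).foldl (fun d i =>
        if PySem.List.pyGetD nums (i + 1) 0 - PySem.List.pyGetD nums i 0 = 1 then
          (d.modify (PySem.List.pyGetD nums i 0) 0 (· + 1)).modify (PySem.List.pyGetD nums (i + 1) 0) 0 (· + 1)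
        else d) d = pvPairFold d nums := by
  match nums with
  | [] => simp [PySem.List.pyRange_one_eq_nil, pvPairFold]
  | x :: xs =>
    have h1 : ((((x :: xs).length : Int)) - 1) = (xs.length : Int) := by simp
    rw [h1, PySem.List.pyRange_one, List.foldl_map]
    have h2 : (List.range ((xs.length : Int) - 0).toNat) = List.range xs.length := by simp
    rw [h2]
    have h3 : ∀ (d : PySem.Dict Int Int) (k : Nat),
        (fun d (i : Int) =>
          if PySem.List.pyGetD (x :: xs) (i + 1) 0 - PySem.List.pyGetD (x :: xs) i 0 = 1 then
            (d.modify (PySem.List.pyGetD (x :: xs) i 0) 0 (· + 1)).modify (PySem.List.pyGetD (x :: xs) (i + 1) 0) 0 (· + 1)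
          else d) d (0 + (k : Int))
        = (fun d k => (fun d u v => if v - u = 1 then (d.modify u 0 (· + 1)).modify v 0 (· + 1) else d)
            d ((x :: xs).getD k 0) (xs.getD k 0)) d k := by
      intro d k
      have hc : (k : Int) + 1 = ((k + 1 : Nat) : Int) := by push_cast; ring
      simp only [zero_add, hc, PySem.List.pyGetD_natCast, List.getD_cons_succ]
    simp only [h3]
    rw [pv_foldl_range_getD_zip (fun d u v => if v - u = 1 then (d.modify u 0 (· + 1)).modify v 0 (· + 1) else d) xs (x :: xs) d (by simp)]
    exact pv_zip_pairFold xs x d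

lemma pv_discard_of_not_mem (s : PySem.Set Int) (x : Int) (hx : x ∉ s) : s.discard x = s := by
  rw [PySem.Set.discard]
  apply List.filter_eq_self.mpr
  intro y hy
  have : y ≠ x := fun h => hx (h ▸ hy)
  simpa using this

-- a weakly sorted list's set of first occurrences is strictly sorted
lemma pv_ofList_pairwise_lt (nums : List Int) (h : nums.Pairwise (· ≤ ·)) :
    (PySem.Set.ofList nums).Pairwise (· < ·) := by
  induction nums with
  | nil => simp [PySem.Set.ofList]
  | cons x t ih =>
    rw [List.pairwise_cons] at h
    rw [PySem.Set.ofList_cons]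
    refine List.Pairwise.cons ?_ ?_
    · intro y hy
      rw [PySem.Set.mem_discard] at hy
      exact lt_of_le_of_ne (h.1 y ((PySem.Set.mem_ofList _ _).mp hy.1)) (fun he => hy.2 he.symm)
    · exact List.Pairwise.sublist List.filter_sublist (ih h.2)

-- duplicates contribute nothing to the pair scan: pvPairFold only sees the distinct values
lemma pv_pairFold_dedup (nums : List Int) (h : nums.Pairwise (· ≤ ·)) (d : PySem.Dict Int Int) :
    pvPairFold d nums = pvPairFold d (PySem.Set.ofList nums) := by
  induction nums generalizing d with
  | nil => simp [PySem.Set.ofList]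
  | cons x t ih =>
    rw [List.pairwise_cons] at h
    match t with
    | [] => simp [pvPairFold, PySem.Set.ofList, pvPairFold]
    | y :: t' =>
      by_cases hxy : x = y
      · subst hxy
        have h1 : pvPairFold d (x :: x :: t') = pvPairFold d (x :: t') := by
          rw [pvPairFold]; norm_num
        have h2 : PySem.Set.ofList (x :: x :: t') = PySem.Set.ofList (x :: t') := by
          simp [PySem.Set.ofList_cons, PySem.Set.discard, List.filter_filter]
        rw [h1, h2, ih h.2 d]
      · have hxnot : x ∉ PySem.Set.ofList (y :: t') := by
          rw [PySem.Set.mem_ofList]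
          intro hmem
          rcases List.mem_cons.mp hmem with h' | h'
          · exact hxy h'
          · have h1 := h.1 x (List.mem_cons_of_mem y h')
            have h2 := (List.pairwise_cons.mp h.2).1 x h'
            have h3 := h.1 y (by simp)
            exact hxy (le_antisymm (by omega) (by omega))
        have hof : PySem.Set.ofList (x :: y :: t') = x :: PySem.Set.ofList (y :: t') := by
          rw [PySem.Set.ofList_cons, pv_discard_of_not_mem _ _ hxnot]
        obtain ⟨r, hr⟩ : ∃ r, PySem.Set.ofList (y :: t') = y :: r := by
          rw [PySem.Set.ofList_cons]; exact ⟨_, rfl⟩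
        rw [hof, hr, pvPairFold, pvPairFold, ← hr, ← ih h.2]

-- central invariant: on a strictly sorted list p ++ y :: t, B's fold over the suffix y :: t equals
-- the pair scan of the suffix started from an accumulator already credited with y's left neighbour
lemma pv_bfold_eq_pairFold_suffix :
    ∀ (t : List Int) (y : Int) (p : List Int) (d : PySem.Dict Int Int),
      (p ++ y :: t).Pairwise (· < ·) →
      (y :: t).foldl (pvBBody (p ++ y :: t)) d
        = pvPairFold (if y - 1 ∈ p then d.modify y 0 (· + 1) else d) (y :: t) := by
  intro t
  induction t with
  | nil =>
    intro y p d hs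
    have hpw := List.pairwise_append.mp hs
    have hpy : ∀ a ∈ p, a < y := fun a ha => hpw.2.2 a ha y (by simp)
    have f1 : (y - 1 ∈ p ++ [y]) ↔ (y - 1 ∈ p) := by
      constructor
      · intro h
        rcases List.mem_append.mp h with h | h
        · exact h
        · simp at h
      · intro h; exact List.mem_append_left _ h
    have f2 : ¬ (y + 1 ∈ p ++ [y]) := by
      intro h
      rcases List.mem_append.mp h with h | h
      · have := hpy _ h; omega
      · simp at h
    by_cases hyp : y - 1 ∈ p
    · simp [pvBBody, f1.mpr hyp, f2, pvPairFold, hyp]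
    · have h1 : ¬ (y - 1 ∈ p ++ [y]) := fun h => hyp (f1.mp h)
      simp [pvBBody, h1, f2, pvPairFold, hyp]
  | cons z t' ih =>
    intro y p d hs
    have hpw := List.pairwise_append.mp hs
    have hpy : ∀ a ∈ p, a < y := fun a ha => hpw.2.2 a ha y (by simp)
    have hyz : y < z := (List.pairwise_cons.mp hpw.2.1).1 z (by simp)
    have htz : ∀ b ∈ t', z < b :=
      (List.pairwise_cons.mp (List.pairwise_cons.mp hpw.2.1).2).1
    have f1 : (y - 1 ∈ p ++ y :: z :: t') ↔ (y - 1 ∈ p) := by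
      constructor
      · intro h
        rcases List.mem_append.mp h with h | h
        · exact h
        · rcases List.mem_cons.mp h with h | h
          · omega
          · rcases List.mem_cons.mp h with h | h
            · omega
            · have := htz _ h; omega
      · intro h; exact List.mem_append_left _ h
    have f2 : (y + 1 ∈ p ++ y :: z :: t') ↔ (z = y + 1) := by
      constructor
      · intro h
        rcases List.mem_append.mp h with h | h
        · have := hpy _ h; omega
        · rcases List.mem_cons.mp h with h | h
          · omega
          · rcases List.mem_cons.mp h with h | h
            · omega
            · have := htz _ h; omega
      · intro h
        exact List.mem_append_right _ (by simp [h])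
    have hseq' : p ++ y :: z :: t' = (p ++ [y]) ++ z :: t' := by simp
    rw [List.foldl_cons]
    have ih' := ih z (p ++ [y]) (pvBBody (p ++ y :: z :: t') d y) (by rw [← hseq']; exact hs)
    rw [hseq'] at ih' ⊢
    rw [ih']
    conv_rhs => rw [pvPairFold]
    rw [← hseq']
    by_cases hc : z = y + 1
    · have hz1 : z - 1 ∈ p ++ [y] := List.mem_append_right _ (by simp; omega)
      have hzy1 : z - y = 1 := by omega
      rw [if_pos hz1, if_pos hzy1]
      by_cases hyp : y - 1 ∈ p
      · have hb : pvBBody (p ++ y :: z :: t') d y = d.modify y 0 (· + 2) := by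
          simp only [pvBBody]
          rw [if_pos (f1.mpr hyp), if_pos (f2.mpr hc)]
          norm_num
        rw [hb, if_pos hyp]
        congr 1
        rw [pv_modify_modify_same]
        norm_num
      · have h1 : ¬ (y - 1 ∈ p ++ y :: z :: t') := fun h => hyp (f1.mp h)
        have hb : pvBBody (p ++ y :: z :: t') d y = d.modify y 0 (· + 1) := by
          simp only [pvBBody]
          rw [if_neg h1, if_pos (f2.mpr hc)]
          norm_num
        rw [hb, if_neg hyp]
    · have hz1 : ¬ (z - 1 ∈ p ++ [y]) := by
        intro h
        rcases List.mem_append.mp h with h | h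
        · have := hpy _ h; omega
        · simp at h; omega
      have hzy1 : ¬ (z - y = 1) := by omega
      have h2 : ¬ (y + 1 ∈ p ++ y :: z :: t') := fun h => hc (f2.mp h)
      rw [if_neg hz1, if_neg hzy1]
      by_cases hyp : y - 1 ∈ p
      · have hb : pvBBody (p ++ y :: z :: t') d y = d.modify y 0 (· + 1) := by
          simp only [pvBBody]
          rw [if_pos (f1.mpr hyp), if_neg h2]
          norm_num
        rw [hb, if_pos hyp]
      · have h1 : ¬ (y - 1 ∈ p ++ y :: z :: t') := fun h => hyp (f1.mp h)
        have hb : pvBBody (p ++ y :: z :: t') d y = d := by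
          simp only [pvBBody]
          rw [if_neg h1, if_neg h2]
          norm_num
        rw [hb, if_neg hyp]

-- B's whole inner loop equals A's pair scan on the distinct sorted values
lemma pv_bfold_eq_pairFold (s : List Int) (hs : s.Pairwise (· < ·)) (d : PySem.Dict Int Int) :
    s.foldl (pvBBody s) d = pvPairFold d s := by
  match s with
  | [] => simp [pvPairFold]
  | y :: t =>
    have := pv_bfold_eq_pairFold_suffix t y [] d (by simpa using hs)
    simpa using this

-- per-round equality of the two loop bodies
lemma pv_round_eq (d : PySem.Dict Int Int) (r : List (String × List Int)) :
    pvRoundA d r = pvRoundB d r := by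
  unfold pvRoundA pvRoundB
  cases hget : (PySem.Dict.ofList r : PySem.Dict String (List Int)).get? "numbers" with
  | none => simp [hget]
  | some numbers =>
    have hgetD : (PySem.Dict.ofList r : PySem.Dict String (List Int)).getD "numbers" [] = numbers := by
      rw [PySem.Dict.getD_eq_get?_getD, hget]; rfl
    simp only [hget, hgetD]
    by_cases hnil : numbers = []
    · simp [hnil]
    · by_cases hlen : numbers.length < 6
      · simp [hnil, hlen]
      · simp only [hnil, hlen, or_false, reduceCtorEq, if_false, Option.some.injEq]
        set nums := PySem.List.sorted ((PySem.List.slice numbers none (some 6)).filter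
            (fun n => decide (1 ≤ n) && decide (n ≤ 45))) (fun n => n) with hnums
        by_cases hn6 : nums.length ≠ 6
        · simp [hn6]
        · simp only [hn6, if_false]
          have hsorted : nums.Pairwise (· ≤ ·) := by
            have := PySem.List.sorted_pairwise ((PySem.List.slice numbers none (some 6)).filter
              (fun n => decide (1 ≤ n) && decide (n ≤ 45))) (fun n => n)
            simpa [← hnums] using this
          have hlt : (PySem.Set.ofList nums).Pairwise (· < ·) := pv_ofList_pairwise_lt nums hsorted
          have hle : (PySem.Set.ofList nums).Pairwise (· ≤ ·) := hlt.imp le_of_lt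
          have hsid : PySem.List.sorted (PySem.Set.ofList nums) (fun v => v) = PySem.Set.ofList nums :=
            PySem.List.sorted_eq_self_of_pairwise _ _ (by simpa using hle)
          rw [pv_innerA_eq_pairFold nums d, pv_pairFold_dedup nums hsorted d, hsid,
            ← pv_bfold_eq_pairFold (PySem.Set.ofList nums) hlt d]
          rfl

-- ===== VERDICT (by name: the statement is the Claim_ definition above) =====
theorem calculate_consecutive_stats_spec : Claim_equal_calculate_consecutive_stats := by
  intro rounds _
  unfold Spec_calculate_consecutive_stats calculate_consecutive_stats calculate_consecutive_stats_alt
  have : pvRoundA = pvRoundB := funext fun d => funext fun r => pv_round_eq d r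
  rw [this]
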